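-- pv_equiv track=rewrite | github.com/iambibhas/tic-tac-toe | play.py | get_game_matrix
-- ===== SOURCE A (Python) =====
-- def get_game_matrix(size: int, game_array: list) -> None:
--     matrix = []
--     for i in range(size):
--         row = []
--         for j in range(size):
--             cell_number = i * size + j
--             row.append(f"{cell_number}:{game_array[cell_number]}   ")
--         matrix.append(row)
--     return matrix
-- ===== SOURCE B (Python) =====
-- def get_game_matrix(size: int, game_array: list) -> None:
--     cells = [f"{n}:{game_array[n]}   " for n in range(size * size)]
--     return [cells[i * size:(i + 1) * size] for i in range(size)]
-- ===== Notes on version B (the rewrite author's own statement) =====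
-- stated objective: alternative
-- what changed: Replaces A's nested row-by-row loop (appending cell strings into each row, rows into the matrix) by one flat linear build of all size*size formatted cells followed by a separate slicing pass that chunks the flat list into rows.
-- outside the precondition, e.g. on get_game_matrix(-2, []): A returns [], B raises IndexError
import Mathlib
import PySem

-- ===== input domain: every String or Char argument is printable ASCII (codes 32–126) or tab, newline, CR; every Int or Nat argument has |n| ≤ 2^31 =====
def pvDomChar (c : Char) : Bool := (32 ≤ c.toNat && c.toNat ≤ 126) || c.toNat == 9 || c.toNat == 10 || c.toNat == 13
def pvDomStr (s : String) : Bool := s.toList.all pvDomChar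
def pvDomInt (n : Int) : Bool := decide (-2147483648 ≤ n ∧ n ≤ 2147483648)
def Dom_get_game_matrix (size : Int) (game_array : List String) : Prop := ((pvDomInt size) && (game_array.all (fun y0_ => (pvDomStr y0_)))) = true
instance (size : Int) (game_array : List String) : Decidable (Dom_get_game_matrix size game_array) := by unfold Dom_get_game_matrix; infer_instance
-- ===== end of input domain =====

-- B replaces A's nested row-building loops by one flat linear build of all cells
-- followed by a separate slicing pass that chunks the flat list into rows (objective: alternative).

-- ===== PORT A =====
def get_game_matrix (size : Int) (game_array : List String) : List (List String) :=
  (PySem.List.pyRange 0 size 1).foldl (fun matrix i =>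
    matrix ++ [(PySem.List.pyRange 0 size 1).foldl (fun row j =>
      row ++ [PySem.Int.toStr (i * size + j) ++ ":" ++
              PySem.List.pyGetD game_array (i * size + j) "" ++ "   "]) []]) []

-- ===== PORT B =====
def get_game_matrix_alt (size : Int) (game_array : List String) : List (List String) :=
  let cells := (PySem.List.pyRange 0 (size * size) 1).map (fun n =>
    PySem.Int.toStr n ++ ":" ++ PySem.List.pyGetD game_array n "" ++ "   ")
  (PySem.List.pyRange 0 size 1).map (fun i =>
    PySem.List.slice cells (some (i * size)) (some ((i + 1) * size)))

-- ===== PRECONDITION & SPEC =====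
-- Pre_ excludes inputs with size*size > len(game_array): there Python A raises IndexError
-- when size > 0, and when size < 0 A returns [] while B's flat build pass raises IndexError.
def Pre_get_game_matrix (size : Int) (game_array : List String) : Prop :=
  size * size ≤ (game_array.length : Int)
instance (size : Int) (game_array : List String) : Decidable (Pre_get_game_matrix size game_array) := by unfold Pre_get_game_matrix; infer_instance
def pvWitness_get_game_matrix : Int × List String := (2, ["X", "O", " ", "X"])

def Spec_get_game_matrix (size : Int) (game_array : List String) (out : List (List String)) : Prop := out = get_game_matrix_alt size game_array
instance (size : Int) (game_array : List String) (out : List (List String)) : Decidable (Spec_get_game_matrix size game_array out) := by unfold Spec_get_game_matrix; infer_instance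

-- ===== CLAIM (what is proved, stated in full; the proofs are below) =====
def Claim_equal_get_game_matrix : Prop := ∀ (size : Int) (game_array : List String), Dom_get_game_matrix size game_array → Pre_get_game_matrix size game_array → Spec_get_game_matrix size game_array (get_game_matrix size game_array)

-- ===== LEMMAS AND PROOFS =====

-- chunking a flat comprehension by slices recovers the row built index-by-index
lemma chunk_map_range (f : Nat → String) (a s : Nat) (ha : a < s) :
    (((List.range (s * s)).map f).drop (a * s)).take s
      = (List.range s).map (fun j => f (a * s + j)) := by
  have hle : a * s + s ≤ s * s := by
    have := Nat.mul_le_mul_right s (Nat.succ_le_of_lt ha)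
    simpa [Nat.succ_mul] using this
  apply List.ext_getElem
  · simp; omega
  · intro j h1 h2
    simp [List.getElem_take, List.getElem_drop]

theorem get_game_matrix_spec : Claim_equal_get_game_matrix := by
  intro size game_array _ hpre
  unfold Spec_get_game_matrix get_game_matrix get_game_matrix_alt
  simp only [PySem.List.foldl_append_singleton_eq_map, List.nil_append]
  by_cases hpos : 0 < size
  case neg =>
    rw [PySem.List.pyRange_one_eq_nil (by omega : size ≤ (0:Int))]
    simp
  case pos =>
    apply List.map_congr_left
    intro i hi
    obtain ⟨hi0, hilt⟩ := (PySem.List.mem_pyRange_one).mp hi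
    obtain ⟨s, hs⟩ : ∃ s : Nat, size = (s : Int) := ⟨size.toNat, (Int.toNat_of_nonneg hpos.le).symm⟩
    obtain ⟨a, hareq⟩ : ∃ a : Nat, i = (a : Int) := ⟨i.toNat, (Int.toNat_of_nonneg hi0).symm⟩
    subst hs hareq
    have ha : a < s := by exact_mod_cast hilt
    have hb1 : (a : Int) * (s : Int) = ((a * s : Nat) : Int) := by push_cast; ring
    have hb2 : ((a : Int) + 1) * (s : Int) = ((a * s : Nat) : Int) + ((s : Nat) : Int) := by
      push_cast; ring
    rw [hb1, hb2, PySem.List.slice_natCast_add]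
    rw [PySem.List.pyRange_one 0 ((s : Int) * s), PySem.List.pyRange_one 0 (s : Int)]
    have hss : (((s : Int) * s - 0).toNat) = s * s := by rw [Int.sub_zero, ← Nat.cast_mul, Int.toNat_natCast]
    have hs0 : (((s : Int) - 0).toNat) = s := by omega
    rw [hss, hs0, List.map_map, List.map_map]
    rw [chunk_map_range _ a s ha]
    apply List.map_congr_left
    intro j hj
    simp only [Function.comp]
    push_cast
    ring_nf
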